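-- pv_equiv track=rewrite | github.com/Shilenkovv/Algorithms_training_6.0_by_Yandex | week02/i.py | sort_algos
-- ===== SOURCE A (Python) =====
-- def sort_algos(n, al_in, al_us, mood):
--     if n == 1:
--         return [1]
--     algos = [0] * n
--     for i in range(n):
--         algos[i] = [i, al_in[i], al_us[i]]
--     algos_in = sorted(algos, key=lambda x: (x[1], x[2]), reverse=True)
--     algos_us = sorted(algos, key=lambda x: (x[2], x[1]), reverse=True)
--     ans = [0] * n
--     used = set()
--     i = in_pointer = us_pointer = 0
--     while i < n and in_pointer < n and us_pointer < n:
--         if mood[i] == 0: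
--             while algos_in[in_pointer][0] in used:
--                 in_pointer += 1
--             ans[i] = algos_in[in_pointer][0]
--         elif mood[i] == 1:
--             while algos_us[us_pointer][0] in used:
--                 us_pointer += 1
--             ans[i] = algos_us[us_pointer][0]
--         used.add(ans[i])
--         i += 1
--
--     return list(map(lambda x: x + 1, ans))
-- ===== SOURCE B (Python) =====
-- def sort_algos(n, al_in, al_us, mood):
--     if n <= 0:
--         return []
--     if n == 1:
--         return [1]
--     # priority orders as id lists: stable ascending sort on negated keys
--     order_in = sorted(range(n), key=lambda i: (-al_in[i], -al_us[i]))
--     order_us = sorted(range(n), key=lambda i: (-al_us[i], -al_in[i]))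
--     queues = {0: order_in, 1: order_us}
--     used = set()
--     ans = []
--     for m in mood[:n]:
--         q = queues[m]
--         while q[0] in used:
--             q.pop(0)
--         used.add(q[0])
--         ans.append(q[0] + 1)
--     return ans
-- ===== Notes on version B (the rewrite author's own statement) =====
-- stated objective: simpler
-- what changed: B drops A's triple-list build, its two key+reverse sorts and the three-pointer while loop over fixed arrays: it sorts index lists by negated keys (stability gives A's tie-breaking), keeps them in a mood->queue dict, and walks mood[:n] once, popping used ids from the front of the selected queue and appending the pick+1 directly; Pre_ excludes mood values other than 0/1 (outside the task's mood domain), where A assigns id 0 and B's dict dispatch raises KeyError.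
-- outside the precondition, e.g. on sort_algos(3, [3, 1, 2], [1, 2, 3], [0, 2, 0]): A returns [1, 1, 3], B raises KeyError
import Mathlib
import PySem

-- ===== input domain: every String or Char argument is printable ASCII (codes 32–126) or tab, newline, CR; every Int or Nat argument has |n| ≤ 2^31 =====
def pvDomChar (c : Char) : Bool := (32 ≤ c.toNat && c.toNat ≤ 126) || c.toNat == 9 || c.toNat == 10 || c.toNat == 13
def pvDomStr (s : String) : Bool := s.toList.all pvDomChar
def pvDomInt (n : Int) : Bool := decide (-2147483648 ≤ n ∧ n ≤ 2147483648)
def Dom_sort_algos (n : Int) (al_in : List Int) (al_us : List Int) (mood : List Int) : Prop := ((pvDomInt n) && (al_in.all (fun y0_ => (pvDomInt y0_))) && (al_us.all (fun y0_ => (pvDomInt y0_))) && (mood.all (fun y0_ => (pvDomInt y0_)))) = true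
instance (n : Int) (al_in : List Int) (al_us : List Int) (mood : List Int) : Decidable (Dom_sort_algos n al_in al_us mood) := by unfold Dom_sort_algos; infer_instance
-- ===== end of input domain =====

-- B replaces A's two full sorted copies + three-pointer while loop by a single pass over mood
-- consuming two id-priority queues (stable ascending sort on negated keys, kept in a mood→queue
-- dict) with pop-from-front lazy deletion; objective: simpler (same asymptotic cost).

-- ===== PORT A =====
-- inner 'while algos_in[in_pointer][0] in used: in_pointer += 1'; walks the suffix
-- ain.drop p (= indexing from p) and returns the new pointer
def pvASkip (used : List Int) : List (Int × Int × Int) → Nat → Nat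
  | [], p => p
  | x :: rest, p => if used.contains x.1 then pvASkip used rest (p + 1) else p

-- outer 'while i < n and in_pointer < n and us_pointer < n'; fuel = n - i (i rises by 1 per pass)
def pvALoop (nN : Nat) (ain aus : List (Int × Int × Int)) (mood : List Int) :
    Nat → Nat → Nat → Nat → List Int → List Int → List Int
  | 0, _, _, _, ans, _ => ans
  | fuel + 1, i, inp, usp, ans, used =>
    if i < nN ∧ inp < nN ∧ usp < nN then
      if PySem.List.pyGetD mood (i : Int) 0 = 0 then
        let inp' := pvASkip used (ain.drop inp) inp
        let pick := (PySem.List.pyGetD ain (inp' : Int) (0, 0, 0)).1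
        pvALoop nN ain aus mood fuel (i + 1) inp' usp
          (PySem.List.pySetD ans (i : Int) pick) (PySem.Set.add used pick)
      else if PySem.List.pyGetD mood (i : Int) 0 = 1 then
        let usp' := pvASkip used (aus.drop usp) usp
        let pick := (PySem.List.pyGetD aus (usp' : Int) (0, 0, 0)).1
        pvALoop nN ain aus mood fuel (i + 1) inp usp'
          (PySem.List.pySetD ans (i : Int) pick) (PySem.Set.add used pick)
      else
        pvALoop nN ain aus mood fuel (i + 1) inp usp ans
          (PySem.Set.add used (PySem.List.pyGetD ans (i : Int) 0))
    else ans

def sort_algos (n : Int) (al_in : List Int) (al_us : List Int) (mood : List Int) : List Int :=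
  if n = 1 then [1]
  else
    let algos := (PySem.List.pyRange 0 n 1).map
      (fun i => (i, PySem.List.pyGetD al_in i 0, PySem.List.pyGetD al_us i 0))
    let algos_in := PySem.List.sorted2 algos (fun x => x.2.1) (fun x => x.2.2) true
    let algos_us := PySem.List.sorted2 algos (fun x => x.2.2) (fun x => x.2.1) true
    let ans := List.replicate n.toNat 0
    (pvALoop n.toNat algos_in algos_us mood n.toNat 0 0 0 ans []).map (fun x => x + 1)

-- ===== PORT B =====
-- 'while q[0] in used: q.pop(0)'
def pvBPop (used : List Int) : List Int → List Int
  | [] => []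
  | x :: rest => if used.contains x then pvBPop used rest else x :: rest

-- 'for m in mood[:n]: …' building ans by append; the dict queues = {0: order_in, 1: order_us}
-- holds aliases of the two (mutated) lists, so it is represented by the two list states oin/ous
-- and 'queues[m]' by matching m against the two keys; a missing key raises KeyError in Python,
-- so the result is only claimed inside Pre_ (the [] arm is never reached there)
def pvBLoop (used oin ous : List Int) : List Int → List Int
  | [] => []
  | m :: rest =>
    if m = 0 then
      let oin' := pvBPop used oin
      let pick := PySem.List.pyGetD oin' 0 0
      (pick + 1) :: pvBLoop (PySem.Set.add used pick) oin' ous rest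
    else if m = 1 then
      let ous' := pvBPop used ous
      let pick := PySem.List.pyGetD ous' 0 0
      (pick + 1) :: pvBLoop (PySem.Set.add used pick) oin ous' rest
    else []

def sort_algos_alt (n : Int) (al_in : List Int) (al_us : List Int) (mood : List Int) : List Int :=
  if n ≤ 0 then []
  else if n = 1 then [1]
  else
    let oin := PySem.List.sorted2 (PySem.List.pyRange 0 n 1)
      (fun i => -(PySem.List.pyGetD al_in i 0)) (fun i => -(PySem.List.pyGetD al_us i 0)) false
    let ous := PySem.List.sorted2 (PySem.List.pyRange 0 n 1)
      (fun i => -(PySem.List.pyGetD al_us i 0)) (fun i => -(PySem.List.pyGetD al_in i 0)) false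
    pvBLoop [] oin ous (PySem.List.slice mood none (some n))

-- ===== PRECONDITION & SPEC =====
-- A raises IndexError when n ≥ 2 exceeds the length of al_in, al_us or mood; additionally,
-- mood values other than 0/1 (outside the task's mood domain) are excluded: there A assigns
-- id 0 (ans[i] left at its initial 0, 0 marked used) while B's dict dispatch queues[m]
-- raises KeyError.
def Pre_sort_algos (n : Int) (al_in : List Int) (al_us : List Int) (mood : List Int) : Prop :=
  n ≤ 1 ∨ (n ≤ (al_in.length : Int) ∧ n ≤ (al_us.length : Int) ∧ n ≤ (mood.length : Int) ∧
    ∀ m ∈ mood.take n.toNat, m = 0 ∨ m = 1)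
instance (n : Int) (al_in : List Int) (al_us : List Int) (mood : List Int) : Decidable (Pre_sort_algos n al_in al_us mood) := by unfold Pre_sort_algos; infer_instance

def pvWitness_sort_algos : Int × List Int × List Int × List Int := (3, [3, 1, 2], [1, 2, 3], [0, 1, 0])

def Spec_sort_algos (n : Int) (al_in : List Int) (al_us : List Int) (mood : List Int) (out : List Int) : Prop := out = sort_algos_alt n al_in al_us mood
instance (n : Int) (al_in : List Int) (al_us : List Int) (mood : List Int) (out : List Int) : Decidable (Spec_sort_algos n al_in al_us mood out) := by unfold Spec_sort_algos; infer_instance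

-- ===== CLAIM (what is proved, stated in full; the proofs are below) =====
def Claim_equal_sort_algos : Prop := ∀ (n : Int) (al_in : List Int) (al_us : List Int) (mood : List Int), Dom_sort_algos n al_in al_us mood → Pre_sort_algos n al_in al_us mood → Spec_sort_algos n al_in al_us mood (sort_algos n al_in al_us mood)

-- ===== LEMMAS AND PROOFS =====

theorem pv_insertBy_map {α β : Type} (f : α → β) (bef : β → β → Bool) (x : α) (l : List α) :
    PySem.List.insertBy bef (f x) (l.map f)
      = (PySem.List.insertBy (fun a b => bef (f a) (f b)) x l).map f := by
  induction l with
  | nil => rfl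
  | cons y ys ih =>
    simp only [List.map_cons, PySem.List.insertBy]
    by_cases h : bef (f x) (f y) = true <;> simp [h, ih]

theorem pv_foldl_insertBy_map {α β : Type} (f : α → β) (bef : β → β → Bool) (l acc : List α) :
    List.foldl (fun acc x => PySem.List.insertBy bef x acc) (acc.map f) (l.map f)
      = (List.foldl (fun acc x => PySem.List.insertBy (fun a b => bef (f a) (f b)) x acc) acc l).map f := by
  induction l generalizing acc with
  | nil => rfl
  | cons y ys ih =>
    simp only [List.map_cons, List.foldl_cons]
    rw [pv_insertBy_map, ih]

-- stable reverse sort by (k1, k2) = stable forward sort by the negated keys, projected to ids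
theorem pv_sort_eq (R : List Int) (f : Int → Int × Int × Int) (k1 k2 : Int × Int × Int → Int)
    (hf : ∀ i, (f i).1 = i) :
    (PySem.List.sorted2 (R.map f) k1 k2 true).map (fun x => x.1)
      = PySem.List.sorted2 R (fun i => -(k1 (f i))) (fun i => -(k2 (f i))) false := by
  unfold PySem.List.sorted2
  simp only [reduceIte]
  rw [show (List.foldl (fun acc x => PySem.List.insertBy (fun a b => decide (k1 b < k1 a) || (!decide (k1 a < k1 b) && decide (k2 b < k2 a))) x acc) [] (R.map f)) = (List.foldl (fun acc x => PySem.List.insertBy (fun a b => decide (k1 (f b) < k1 (f a)) || (!decide (k1 (f a) < k1 (f b)) && decide (k2 (f b) < k2 (f a)))) x acc) [] R).map f from pv_foldl_insertBy_map f _ R []]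
  rw [List.map_map]
  have hid : ((fun x : Int × Int × Int => x.1) ∘ f) = id := by
    funext i
    simp [hf i]
  rw [hid, List.map_id]
  congr 1
  funext a b
  simp [neg_lt_neg_iff]

theorem pv_skipA_eq (used : List Int) (t : List (Int × Int × Int)) (p : Nat) :
    pvASkip used t p = p + (t.takeWhile (fun x => decide (x.1 ∈ used))).length := by
  induction t generalizing p with
  | nil => simp [pvASkip]
  | cons x rest ih =>
    by_cases h : x.1 ∈ used <;>
      simp [pvASkip, h, ih] <;> omega

theorem pv_popB_eq (used l : List Int) :
    pvBPop used l = l.drop ((l.takeWhile (fun x => decide (x ∈ used))).length) := by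
  induction l with
  | nil => rfl
  | cons x rest ih =>
    by_cases h : x ∈ used <;> simp [pvBPop, h, ih]

-- mood[:n] under the precondition
theorem pv_slice_eq (mood : List Int) (n : Int) (h0 : 0 ≤ n) (h : n ≤ (mood.length : Int)) :
    PySem.List.slice mood none (some n) = mood.take n.toNat := by
  simp only [PySem.List.slice, PySem.List.clampIdx]
  have hn : ¬ n < 0 := by omega
  rw [if_neg hn, min_eq_left (by omega : n.toNat ≤ mood.length)]
  simp

theorem pv_drop_tw {α : Type} (p : α → Bool) (l : List α) :
    l.drop (l.takeWhile p).length = l.dropWhile p := by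
  induction l with
  | nil => rfl
  | cons x xs ih => by_cases h : p x <;> simp [h, ih]

theorem pv_tw_map (p : Int → Bool) (l : List (Int × Int × Int)) :
    (l.map (fun x => x.1)).takeWhile p = (l.takeWhile (fun x => p x.1)).map (fun x => x.1) := by
  rw [List.takeWhile_map]; rfl

theorem pv_nodup_le (l m : List Int) (h : l.Nodup) (hs : l ⊆ m) : l.length ≤ m.length := by
  have h1 := List.toFinset_card_le m (α := Int)
  have h2 : l.toFinset ⊆ m.toFinset := by intro x hx; simp at hx ⊢; exact hs hx
  have h3 := Finset.card_le_card h2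
  simp [List.toFinset_card_of_nodup h] at h3
  omega


theorem pv_step (nN : Nat) (xs : List (Int × Int × Int)) (used : List Int) (inp i : Nat)
    (hperm : (xs.map (fun x => x.1)).Perm (PySem.List.pyRange 0 (nN : Int) 1))
    (hpre : ∀ x ∈ (xs.map (fun x => x.1)).take inp, x ∈ used)
    (hnd : used.Nodup) (hulen : used.length ≤ i) (hilt : i < nN) :
    ∃ j : Nat,
      pvASkip used (xs.drop inp) inp = inp + j ∧
      pvBPop used ((xs.map (fun x => x.1)).drop inp) = (xs.map (fun x => x.1)).drop (inp + j) ∧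
      inp + j < nN ∧
      PySem.List.pyGetD ((xs.map (fun x => x.1)).drop (inp + j)) 0 0
        = (PySem.List.pyGetD xs ((inp + j : Nat) : Int) (0, 0, 0)).1 ∧
      (PySem.List.pyGetD xs ((inp + j : Nat) : Int) (0, 0, 0)).1 ∉ used ∧
      (PySem.List.pyGetD xs ((inp + j : Nat) : Int) (0, 0, 0)).1 ∈ PySem.List.pyRange 0 (nN : Int) 1 ∧
      (∀ x ∈ (xs.map (fun x => x.1)).take (inp + j), x ∈ used) := by
  have hRlen : (PySem.List.pyRange 0 (nN : Int) 1).length = nN := by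
    simp [PySem.List.pyRange_zero_natCast]
  have hIlen : (xs.map (fun x => x.1)).length = nN := by rw [hperm.length_eq, hRlen]
  have hxslen : xs.length = nN := by simpa using hIlen
  have hRnd : (PySem.List.pyRange 0 (nN : Int) 1).Nodup := by
    rw [PySem.List.pyRange_zero_natCast]
    exact (List.nodup_range).map (fun a b h => by exact_mod_cast h)
  have hInd : (xs.map (fun x => x.1)).Nodup := (hperm.nodup_iff).mpr hRnd
  have hjlt : ((xs.drop inp).takeWhile (fun x => decide (x.1 ∈ used))).length
      < (xs.drop inp).length := by
    by_contra hge
    push_neg at hge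
    have hpf := List.takeWhile_prefix (p := fun x : Int × Int × Int => decide (x.1 ∈ used)) (l := xs.drop inp)
    have heq : (xs.drop inp).takeWhile (fun x => decide (x.1 ∈ used)) = xs.drop inp :=
      hpf.eq_of_length (le_antisymm hpf.length_le hge)
    have hallsub : (xs.map (fun x => x.1)) ⊆ used := by
      intro y hy
      have hy2 : y ∈ (xs.map (fun x => x.1)).take inp ++ (xs.map (fun x => x.1)).drop inp := by
        rw [List.take_append_drop]; exact hy
      rcases List.mem_append.mp hy2 with h | h
      · exact hpre y h
      · rw [← List.map_drop] at h
        rcases List.mem_map.mp h with ⟨x, hx, rfl⟩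
        have hx2 : x ∈ (xs.drop inp).takeWhile (fun x => decide (x.1 ∈ used)) := by
          rw [heq]; exact hx
        simpa using List.mem_takeWhile_imp hx2
    have := pv_nodup_le _ _ hInd hallsub
    omega
  set j := ((xs.drop inp).takeWhile (fun x => decide (x.1 ∈ used))).length with hjdef
  have hdlen : (xs.drop inp).length = nN - inp := by simp [hxslen]
  have hinpj : inp + j < nN := by omega
  -- the j-th remaining triple
  have hxg : inp + j < xs.length := by omega
  have hXg : inp + j < (xs.map (fun x => x.1)).length := by simpa using hxg
  have hpickA : PySem.List.pyGetD xs ((inp + j : Nat) : Int) (0, 0, 0) = xs[inp + j] := by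
    rw [PySem.List.pyGetD_natCast]
    exact List.getD_eq_getElem _ _ hxg
  -- B's list after popping = ids from position inp + j
  have hmapdrop : (xs.map (fun x => x.1)).drop inp = (xs.drop inp).map (fun x => x.1) := by
    rw [List.map_drop]
  have hpop : pvBPop used ((xs.map (fun x => x.1)).drop inp)
      = (xs.map (fun x => x.1)).drop (inp + j) := by
    rw [pv_popB_eq, hmapdrop, pv_tw_map, List.length_map, ← hjdef, ← hmapdrop, List.drop_drop,
      Nat.add_comm]
  -- the picked id is the first unused one
  have hdw : (xs.drop inp).drop j = (xs.drop inp).dropWhile (fun x => decide (x.1 ∈ used)) := by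
    rw [hjdef, pv_drop_tw]
  have hne : (xs.drop inp).dropWhile (fun x => decide (x.1 ∈ used)) ≠ [] := by
    rw [← hdw]
    intro hcon
    have := congrArg List.length hcon
    simp at this
    omega
  have hheadfail := List.head_dropWhile_not (fun x : Int × Int × Int => decide (x.1 ∈ used)) hne
  have hheadeq : ((xs.drop inp).dropWhile (fun x => decide (x.1 ∈ used))).head hne = xs[inp + j] := by
    have h1 := List.head?_eq_some_head hne
    have h2 : ((xs.drop inp).dropWhile (fun x => decide (x.1 ∈ used))).head?
        = ((xs.drop inp).drop j).head? := by rw [hdw]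
    have h3 : ((xs.drop inp).drop j).head? = some ((xs.drop inp)[j]'hjlt) := by
      rw [List.head?_drop]
      exact List.getElem?_eq_getElem hjlt
    have h4 : (xs.drop inp)[j]'hjlt = xs[inp + j]'hxg := List.getElem_drop ..
    rw [h2, h3, h4] at h1
    exact (Option.some.inj h1).symm
  have hnotin : xs[inp + j].1 ∉ used := by
    rw [hheadeq] at hheadfail
    simpa using hheadfail
  refine ⟨j, pv_skipA_eq _ _ _, hpop, hinpj, ?_, ?_, ?_, ?_⟩
  · -- pyGetD of the dropped id list at 0
    rw [hpickA, show (0 : Int) = ((0 : Nat) : Int) from rfl, PySem.List.pyGetD_natCast]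
    have hlen0 : 0 < ((xs.map (fun x => x.1)).drop (inp + j)).length := by
      simp [hxslen]; omega
    rw [List.getD_eq_getElem _ _ hlen0, List.getElem_drop]
    simp
  · rw [hpickA]; exact hnotin
  · rw [hpickA]
    refine hperm.subset ?_
    exact List.mem_map.mpr ⟨xs[inp + j], List.getElem_mem hxg, rfl⟩
  · intro x hx
    rw [List.take_add] at hx
    rcases List.mem_append.mp hx with h | h
    · exact hpre x h
    · rw [hmapdrop] at h
      have htake : List.take j ((xs.drop inp).map (fun x => x.1))
          = ((xs.drop inp).takeWhile (fun x => decide (x.1 ∈ used))).map (fun x => x.1) := by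
        rw [← pv_tw_map (fun y => decide (y ∈ used))]
        have hpf := List.takeWhile_prefix (p := fun y : Int => decide (y ∈ used))
          (l := (xs.drop inp).map (fun x => x.1))
        have hlen : (((xs.drop inp).map (fun x => x.1)).takeWhile
            (fun y => decide (y ∈ used))).length = j := by
          rw [pv_tw_map, List.length_map, hjdef]
        rw [← hlen]
        exact (List.prefix_iff_eq_take.mp hpf).symm
      rw [htake] at h
      rcases List.mem_map.mp h with ⟨y, hy, rfl⟩
      simpa using List.mem_takeWhile_imp hy


theorem pv_take_set (xs : List Int) (i : Nat) (v : Int) (h : i < xs.length) :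
    (xs.set i v).take (i + 1) = xs.take i ++ [v] := by
  rw [List.take_add_one]
  simp [List.take_set_of_le (le_refl i), h]


theorem pv_loop_eq (nN : Nat) (ain aus : List (Int × Int × Int)) (mood : List Int)
    (hnN : 0 < nN) (hmood : nN ≤ mood.length)
    (hm01 : ∀ m ∈ mood.take nN, m = 0 ∨ m = 1)
    (hIperm : (ain.map (fun x => x.1)).Perm (PySem.List.pyRange 0 (nN : Int) 1))
    (hUperm : (aus.map (fun x => x.1)).Perm (PySem.List.pyRange 0 (nN : Int) 1)) :
    ∀ (ms : List Int) (i inp usp : Nat) (ans used : List Int),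
      ms = (mood.take nN).drop i → i ≤ nN → inp < nN → usp < nN →
      (∀ x ∈ (ain.map (fun x => x.1)).take inp, x ∈ used) →
      (∀ x ∈ (aus.map (fun x => x.1)).take usp, x ∈ used) →
      (∀ x ∈ used, x ∈ PySem.List.pyRange 0 (nN : Int) 1) →
      used.Nodup → used.length ≤ i →
      ans.length = nN → ans.drop i = List.replicate (nN - i) 0 →
      (pvALoop nN ain aus mood (nN - i) i inp usp ans used).map (fun x => x + 1)
        = ((ans.take i).map (fun x => x + 1))
            ++ pvBLoop used ((ain.map (fun x => x.1)).drop inp) ((aus.map (fun x => x.1)).drop usp) ms := by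
  intro ms
  induction ms with
  | nil =>
    intro i inp usp ans used hms hi hinp husp hpreI hpreU hsub hnd hulen halen hadrop
    have htl : (mood.take nN).length = nN := by simp [hmood]
    have hiN : i = nN := by
      have hc := congrArg List.length hms
      simp [htl] at hc
      omega
    subst hiN
    rw [Nat.sub_self]
    simp only [pvALoop, pvBLoop]
    rw [List.take_of_length_le (le_of_eq halen)]
    simp
  | cons m rest ih =>
    intro i inp usp ans used hms hi hinp husp hpreI hpreU hsub hnd hulen halen hadrop
    have htl : (mood.take nN).length = nN := by simp [hmood]
    have hilt : i < nN := by
      have hc := congrArg List.length hms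
      simp [htl] at hc
      omega
    have hrest : rest = (mood.take nN).drop (i + 1) := by
      have ht : ((mood.take nN).drop i).tail = (mood.take nN).drop (i + 1) := List.tail_drop ..
      rw [← hms] at ht
      simpa using ht
    have hmmem : m ∈ mood.take nN := by
      have : m ∈ (mood.take nN).drop i := by rw [← hms]; exact List.mem_cons_self ..
      exact List.mem_of_mem_drop this
    have hm : PySem.List.pyGetD mood (i : Int) 0 = m := by
      have h1 : ((mood.take nN).drop i).head? = some m := by rw [← hms]; rfl
      rw [List.head?_drop, List.getElem?_take] at h1
      rw [PySem.List.pyGetD_natCast]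
      have hilen : i < mood.length := by omega
      rw [List.getD_eq_getElem _ _ hilen]
      rw [if_pos hilt, List.getElem?_eq_getElem hilen] at h1
      exact Option.some.inj h1
    have hansq : ans[i]? = some 0 := by
      rw [← Nat.add_zero i, ← List.getElem?_drop, hadrop,
        show nN - i = (nN - i - 1) + 1 from by omega]
      simp [List.replicate_succ]
    rw [show nN - i = (nN - (i + 1)) + 1 from by omega]
    simp only [pvALoop, pvBLoop]
    rw [if_pos ⟨hilt, hinp, husp⟩, hm]
    have hdropsucc : ans.drop (i + 1) = List.replicate (nN - (i + 1)) 0 := by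
      have : ans.drop (i + 1) = (ans.drop i).drop 1 := by rw [List.drop_drop, Nat.add_comm]
      rw [this, hadrop, List.drop_replicate]
      congr 1
    by_cases hm0 : m = 0
    · -- mood 0: pick from ain
      obtain ⟨j, hskip, hpop, hinpj, hpick, hnotin, hmemR, hpre'⟩ :=
        pv_step nN ain used inp i hIperm hpreI hnd hulen hilt
      simp only [if_pos hm0]
      rw [hskip, hpop, hpick]
      set pick := (PySem.List.pyGetD ain ((inp + j : Nat) : Int) (0, 0, 0)).1 with hpickdef
      have hadd : PySem.Set.add used pick = used ++ [pick] := by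
        simp [PySem.Set.add]
        intro hc
        exact absurd hc hnotin
      have halen' : i < ans.length := by omega
      rw [ih (i + 1) (inp + j) usp (PySem.List.pySetD ans (i : Int) pick) (PySem.Set.add used pick)
        hrest (by omega) hinpj husp
        (by
          rw [hadd]
          intro x hx
          exact List.mem_append_left _ (hpre' x hx))
        (by
          rw [hadd]
          intro x hx
          exact List.mem_append_left _ (hpreU x hx))
        (by
          rw [hadd]
          intro x hx
          rcases List.mem_append.mp hx with h | h
          · exact hsub x h
          · simp at h; subst h; exact hmemR)
        (PySem.Set.nodup_add used pick hnd)
        (by rw [hadd]; simp; omega)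
        (by simp [PySem.List.pySetD_natCast, halen])
        (by rw [PySem.List.pySetD_natCast, List.drop_set_of_lt (by omega : i < i + 1)]
            exact hdropsucc)]
      rw [PySem.List.pySetD_natCast, pv_take_set ans i pick halen']
      simp [List.append_assoc]
    · -- mood ≠ 0: by Pre_, m = 1, pick from aus
      have hm1 : m = 1 := (hm01 m hmmem).resolve_left hm0
      obtain ⟨j, hskip, hpop, hinpj, hpick, hnotin, hmemR, hpre'⟩ :=
        pv_step nN aus used usp i hUperm hpreU hnd hulen hilt
      simp only [if_neg hm0, if_pos hm1]
      rw [hskip, hpop, hpick]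
      set pick := (PySem.List.pyGetD aus ((usp + j : Nat) : Int) (0, 0, 0)).1 with hpickdef
      have hadd : PySem.Set.add used pick = used ++ [pick] := by
        simp [PySem.Set.add]
        intro hc
        exact absurd hc hnotin
      have halen' : i < ans.length := by omega
      rw [ih (i + 1) inp (usp + j) (PySem.List.pySetD ans (i : Int) pick) (PySem.Set.add used pick)
        hrest (by omega) hinp hinpj
        (by
          rw [hadd]
          intro x hx
          exact List.mem_append_left _ (hpreI x hx))
        (by
          rw [hadd]
          intro x hx
          exact List.mem_append_left _ (hpre' x hx))
        (by
          rw [hadd]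
          intro x hx
          rcases List.mem_append.mp hx with h | h
          · exact hsub x h
          · simp at h; subst h; exact hmemR)
        (PySem.Set.nodup_add used pick hnd)
        (by rw [hadd]; simp; omega)
        (by simp [PySem.List.pySetD_natCast, halen])
        (by rw [PySem.List.pySetD_natCast, List.drop_set_of_lt (by omega : i < i + 1)]
            exact hdropsucc)]
      rw [PySem.List.pySetD_natCast, pv_take_set ans i pick halen']
      simp [List.append_assoc]

-- ===== VERDICT (by name: the statement is the Claim_ definition above) =====
theorem sort_algos_spec : Claim_equal_sort_algos := by
  intro n al_in al_us mood _hdom hpre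
  unfold Spec_sort_algos
  by_cases h1 : n = 1
  · subst h1
    simp [sort_algos, sort_algos_alt]
  by_cases h0 : n ≤ 0
  · -- n ≤ 0: both return []
    simp only [sort_algos, sort_algos_alt]
    rw [if_neg h1, if_pos h0]
    rw [show n.toNat = 0 from by omega]
    simp [pvALoop]
  · -- 2 ≤ n
    obtain hb := hpre.resolve_left (by omega)
    obtain ⟨hbin, hbus, hbm, hbmood⟩ := hb
    simp only [sort_algos, sort_algos_alt]
    rw [if_neg h1, if_neg h0, if_neg h1]
    have hncast : ((n.toNat : Nat) : Int) = n := by omega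
    have hsortin := pv_sort_eq (PySem.List.pyRange 0 n 1)
      (fun i => (i, PySem.List.pyGetD al_in i 0, PySem.List.pyGetD al_us i 0))
      (fun x => x.2.1) (fun x => x.2.2) (fun i => rfl)
    have hsortus := pv_sort_eq (PySem.List.pyRange 0 n 1)
      (fun i => (i, PySem.List.pyGetD al_in i 0, PySem.List.pyGetD al_us i 0))
      (fun x => x.2.2) (fun x => x.2.1) (fun i => rfl)
    have hperm_in : ((PySem.List.sorted2
        ((PySem.List.pyRange 0 n 1).map
          (fun i => (i, PySem.List.pyGetD al_in i 0, PySem.List.pyGetD al_us i 0)))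
        (fun x => x.2.1) (fun x => x.2.2) true).map (fun x => x.1)).Perm
        (PySem.List.pyRange 0 ((n.toNat : Nat) : Int) 1) := by
      rw [hncast, hsortin]
      exact PySem.List.sorted2_perm _ _ _ _
    have hperm_us : ((PySem.List.sorted2
        ((PySem.List.pyRange 0 n 1).map
          (fun i => (i, PySem.List.pyGetD al_in i 0, PySem.List.pyGetD al_us i 0)))
        (fun x => x.2.2) (fun x => x.2.1) true).map (fun x => x.1)).Perm
        (PySem.List.pyRange 0 ((n.toNat : Nat) : Int) 1) := by
      rw [hncast, hsortus]
      exact PySem.List.sorted2_perm _ _ _ _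
    have hmain := pv_loop_eq n.toNat
      (PySem.List.sorted2
        ((PySem.List.pyRange 0 n 1).map
          (fun i => (i, PySem.List.pyGetD al_in i 0, PySem.List.pyGetD al_us i 0)))
        (fun x => x.2.1) (fun x => x.2.2) true)
      (PySem.List.sorted2
        ((PySem.List.pyRange 0 n 1).map
          (fun i => (i, PySem.List.pyGetD al_in i 0, PySem.List.pyGetD al_us i 0)))
        (fun x => x.2.2) (fun x => x.2.1) true)
      mood (by omega) (by omega) hbmood hperm_in hperm_us
      (mood.take n.toNat) 0 0 0 (List.replicate n.toNat 0) []
      (by simp) (by omega) (by omega) (by omega)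
      (by simp) (by simp) (by simp) (by simp) (by simp)
      (by simp) (by simp)
    rw [Nat.sub_zero] at hmain
    rw [hmain]
    rw [List.drop_zero, List.drop_zero, hsortin, hsortus,
      pv_slice_eq mood n (by omega) hbm]
    simp
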